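-- pv_equiv track=rewrite | github.com/kuldeepdhadhwal/leetcode150 | EveryDayProblem/calculateMoney.py | totalMoney
-- ===== SOURCE A (Python) =====
-- def totalMoney(n: int) -> int:
--     total_amount = 0
--     day_amount = 1
--     week_start = 1
--
--     for i in range(1,n+1):
--         total_amount += day_amount
--         day_amount+=1
--         if int(i%7) == 0:
--             week_start +=1
--             day_amount = week_start
--
--     return total_amount
-- ===== SOURCE B (Python) =====
-- def totalMoney(n: int) -> int:
--     m = n if n > 0 else 0
--     w, r = divmod(m, 7)
--     full = 28 * w + 7 * (w * (w - 1) // 2)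
--     partial = r * w + r * (r + 1) // 2
--     return full + partial
-- ===== Notes on version B (the rewrite author's own statement) =====
-- stated objective: faster
-- what changed: Replaced the day-by-day loop with an O(1) closed form: arithmetic-series sum of the full weeks plus the partial week.
import Mathlib
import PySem

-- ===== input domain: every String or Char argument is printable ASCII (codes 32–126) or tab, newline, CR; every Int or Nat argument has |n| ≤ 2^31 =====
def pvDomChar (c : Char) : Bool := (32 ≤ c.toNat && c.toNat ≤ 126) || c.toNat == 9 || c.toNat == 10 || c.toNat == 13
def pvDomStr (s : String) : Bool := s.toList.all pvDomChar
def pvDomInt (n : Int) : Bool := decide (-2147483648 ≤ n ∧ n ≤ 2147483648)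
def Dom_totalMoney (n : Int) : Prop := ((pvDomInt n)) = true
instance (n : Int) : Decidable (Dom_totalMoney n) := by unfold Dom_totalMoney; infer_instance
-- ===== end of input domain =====

-- B replaces A's day-by-day loop with an O(1) closed form (full-week arithmetic series + partial week).


-- ===== PORT A =====
-- state = (total_amount, day_amount, week_start)
def totalMoneyStep (st : Int × Int × Int) (i : Int) : Int × Int × Int :=
  let total := st.1 + st.2.1
  let day := st.2.1 + 1
  let week := st.2.2
  if PySem.Int.mod i 7 = 0 then (total, week + 1, week + 1)
  else (total, day, week)

def totalMoney (n : Int) : Int :=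
  ((PySem.List.pyRange 1 (n + 1) 1).foldl totalMoneyStep (0, 1, 1)).1

-- ===== PORT B =====
def totalMoney_alt (n : Int) : Int :=
  let m := if n > 0 then n else 0
  let w := PySem.Int.floordiv m 7
  let r := PySem.Int.mod m 7
  let full := 28 * w + 7 * PySem.Int.floordiv (w * (w - 1)) 2
  let part := r * w + PySem.Int.floordiv (r * (r + 1)) 2
  full + part

-- ===== PRECONDITION & SPEC =====
def Spec_totalMoney (n : Int) (out : Int) : Prop := out = totalMoney_alt n
instance (n : Int) (out : Int) : Decidable (Spec_totalMoney n out) := by unfold Spec_totalMoney; infer_instance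

-- ===== CLAIM (what is proved, stated in full; the proofs are below) =====
def Claim_equal_totalMoney : Prop := ∀ (n : Int), Dom_totalMoney n → Spec_totalMoney n (totalMoney n)

-- ===== LEMMAS AND PROOFS =====

-- triangular-number step over Int: (q+1)*q/2 = q*(q-1)/2 + q
lemma pv_tri_step (q : Int) : (q + 1) * q / 2 = q * (q - 1) / 2 + q := by
  obtain ⟨k, hk⟩ := Int.even_mul_succ_self (q - 1)
  have h1 : q * (q - 1) = 2 * k := by ring_nf; ring_nf at hk; omega
  have h2 : (q + 1) * q = 2 * (k + q) := by nlinarith [hk]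
  rw [h1, h2, Int.mul_ediv_cancel_left _ (by norm_num), Int.mul_ediv_cancel_left _ (by norm_num)]

-- closed form of B at a Nat cast
lemma pv_alt_natCast (m : Nat) :
    totalMoney_alt (m : Int) =
      28 * ((m / 7 : Nat) : Int) + 7 * ((((m / 7 : Nat) : Int)) * (((m / 7 : Nat) : Int) - 1) / 2)
      + ((m % 7 : Nat) : Int) * ((m / 7 : Nat) : Int)
      + (((m % 7 : Nat) : Int) * (((m % 7 : Nat) : Int) + 1) / 2) := by
  have hm : (if (m : Int) > 0 then (m : Int) else 0) = (m : Int) := by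
    split_ifs with h
    · rfl
    · omega
  have hfd : PySem.Int.floordiv (m : Int) 7 = ((m / 7 : Nat) : Int) := by
    exact_mod_cast PySem.Int.floordiv_natCast m 7
  have hmd : PySem.Int.mod (m : Int) 7 = ((m % 7 : Nat) : Int) := by
    exact_mod_cast PySem.Int.mod_natCast m 7
  have hfd2 : ∀ a : Int, PySem.Int.floordiv a 2 = a / 2 := fun a =>
    PySem.Int.floordiv_eq_ediv_of_pos (by norm_num)
  unfold totalMoney_alt
  simp only [hm, hfd, hmd, hfd2]
  ring

-- B's closed form satisfies the loop's per-day recurrence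
lemma pv_alt_succ (m : Nat) :
    totalMoney_alt ((m : Int) + 1) =
      totalMoney_alt (m : Int) + (((m % 7 : Nat) : Int) + ((m / 7 : Nat) : Int) + 1) := by
  have h1 : ((m : Int) + 1) = ((m + 1 : Nat) : Int) := by push_cast; ring
  rw [h1, pv_alt_natCast, pv_alt_natCast]
  set q := m / 7 with hq
  set r := m % 7 with hr
  have hr7 : r < 7 := Nat.mod_lt _ (by norm_num)
  by_cases hc : r = 6
  · have hd : (m + 1) / 7 = q + 1 := by omega
    have he : (m + 1) % 7 = 0 := by omega
    rw [hd, he, hc]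
    push_cast
    have := pv_tri_step (q : Int)
    generalize hT : ((q : Int)) * ((q : Int) - 1) / 2 = T at *
    norm_num
    linarith [this]
  · have hd : (m + 1) / 7 = q := by omega
    have he : (m + 1) % 7 = r + 1 := by omega
    rw [hd, he]
    have hrt : ((r + 1 : Nat) : Int) * (((r + 1 : Nat) : Int) + 1) / 2
        = ((r : Nat) : Int) * (((r : Nat) : Int) + 1) / 2 + ((r : Nat) : Int) + 1 := by
      interval_cases r <;> decide
    push_cast at hrt ⊢
    generalize ((q : Int)) * ((q : Int) - 1) / 2 = T
    linarith [hrt]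

-- invariant of A's loop after m days
lemma pv_state (m : Nat) :
    (PySem.List.pyRange 1 ((m : Int) + 1) 1).foldl totalMoneyStep (0, 1, 1)
      = (totalMoney_alt (m : Int),
         ((m % 7 : Nat) : Int) + ((m / 7 : Nat) : Int) + 1,
         ((m / 7 : Nat) : Int) + 1) := by
  induction m with
  | zero =>
      rw [PySem.List.pyRange_one_eq_nil (by norm_num)]
      simp [List.foldl]
      decide
  | succ k ih =>
      have hsplit : PySem.List.pyRange 1 ((k : Int) + 1 + 1) 1
          = PySem.List.pyRange 1 ((k : Int) + 1) 1 ++ [(k : Int) + 1] := by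
        exact PySem.List.pyRange_one_succ_right (by omega)
      have h1 : ((k + 1 : Nat) : Int) + 1 = ((k : Int) + 1 + 1) := by push_cast; ring
      rw [h1, hsplit, List.foldl_append, ih]
      have hmod : PySem.Int.mod ((k : Int) + 1) 7 = (((k + 1) % 7 : Nat) : Int) := by
        have : ((k : Int) + 1) = ((k + 1 : Nat) : Int) := by push_cast; ring
        rw [this]; exact_mod_cast PySem.Int.mod_natCast (k + 1) 7
      unfold totalMoneyStep
      simp only [List.foldl, hmod]
      by_cases hc : (k + 1) % 7 = 0
      · rw [if_pos (by exact_mod_cast congrArg (Nat.cast : Nat → Int) hc)]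
        have hd : (k + 1) / 7 = k / 7 + 1 := by omega
        have he : k % 7 = 6 := by omega
        rw [show ((k + 1 : Nat) : Int) = (k : Int) + 1 by push_cast; ring, pv_alt_succ, hc, hd, he]
        push_cast
        simp only [Prod.mk.injEq]
        refine ⟨trivial, by omega, trivial⟩
      · rw [if_neg (by
          intro h
          exact hc (by exact_mod_cast h))]
        have hd : (k + 1) / 7 = k / 7 := by omega
        have he : (k + 1) % 7 = k % 7 + 1 := by omega
        rw [show ((k + 1 : Nat) : Int) = (k : Int) + 1 by push_cast; ring, pv_alt_succ, hd, he]
        push_cast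
        simp only [Prod.mk.injEq]
        refine ⟨trivial, by omega, trivial⟩

-- ===== VERDICT (by name: the statement is the Claim_ definition above) =====
theorem totalMoney_spec : Claim_equal_totalMoney := by
  intro n _
  unfold Spec_totalMoney
  by_cases hn : 0 < n
  · have hm : n = ((n.toNat : Nat) : Int) := by omega
    rw [hm]
    unfold totalMoney
    rw [pv_state n.toNat]
  · unfold totalMoney
    rw [PySem.List.pyRange_one_eq_nil (by omega)]
    unfold totalMoney_alt
    rw [if_neg hn]
    decide
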